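-- pv_equiv track=rewrite | github.com/loco-philippe/NTV | json_ntv/ntv_validate.py | base64_valid
-- ===== SOURCE A (Python) =====
-- def base64_valid(val):
--     '''validate method'''
--     if not isinstance(val, str):
--         return False
--     for car in val:
--         if (not 'a' <= car <= 'z' and not 'A' <= car <= 'Z' and
--                 not '0' <= car <= '9' and not car in ['-', '_', '=']):
--             return False
--     return True
-- ===== SOURCE B (Python) =====
-- import re
--
-- _B64URL = re.compile(r'[A-Za-z0-9\-_=]*')
--
-- def base64_valid(val):
--     if not isinstance(val, str):
--         return False
--     return bool(_B64URL.fullmatch(val))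
-- ===== Notes on version B (the rewrite author's own statement) =====
-- stated objective: idiomatic
-- what changed: Replaced the explicit per-character loop with chained range comparisons and early return by a single precompiled regular-expression fullmatch over the character class [A-Za-z0-9\-_=]; the C regex engine gives a measured constant-factor speedup.
import Mathlib
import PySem

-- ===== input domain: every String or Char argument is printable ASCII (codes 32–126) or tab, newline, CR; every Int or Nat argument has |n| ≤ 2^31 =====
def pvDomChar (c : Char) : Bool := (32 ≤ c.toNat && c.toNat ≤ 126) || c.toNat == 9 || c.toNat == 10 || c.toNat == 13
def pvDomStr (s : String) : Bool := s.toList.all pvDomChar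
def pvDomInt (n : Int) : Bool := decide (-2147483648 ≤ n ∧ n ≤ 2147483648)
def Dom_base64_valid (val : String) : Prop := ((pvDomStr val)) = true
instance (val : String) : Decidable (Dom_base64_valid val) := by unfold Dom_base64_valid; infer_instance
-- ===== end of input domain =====

-- B replaces the per-character loop by one regex fullmatch over the base64url character class (idiomatic).
-- The Python-level isinstance guard is outside the String-typed ports.
-- ===== PORT A =====
def base64_valid_loop : List Char → Bool
  | [] => true
  | car :: rest =>
      if ¬('a' ≤ car ∧ car ≤ 'z') ∧ ¬('A' ≤ car ∧ car ≤ 'Z') ∧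
         ¬('0' ≤ car ∧ car ≤ '9') ∧ car ∉ ['-', '_', '='] then false
      else base64_valid_loop rest

def base64_valid (val : String) : Bool := base64_valid_loop val.toList

-- ===== PORT B =====
-- the regex character class [A-Za-z0-9\-_=]
def b64Class (c : Char) : Bool :=
  ('A' ≤ c && c ≤ 'Z') || ('a' ≤ c && c ≤ 'z') || ('0' ≤ c && c ≤ '9') || c == '-' || c == '_' || c == '='

-- re.fullmatch of the class with '*' = every character is in the class
def base64_valid_alt (val : String) : Bool := val.toList.all b64Class

-- ===== PRECONDITION & SPEC =====
def Spec_base64_valid (val : String) (out : Bool) : Prop := out = base64_valid_alt val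
instance (val : String) (out : Bool) : Decidable (Spec_base64_valid val out) := by unfold Spec_base64_valid; infer_instance

-- ===== CLAIM (what is proved, stated in full; the proofs are below) =====
def Claim_equal_base64_valid : Prop := ∀ (val : String), Dom_base64_valid val → Spec_base64_valid val (base64_valid val)

-- ===== LEMMAS AND PROOFS =====

-- ===== VERDICT (by name: the statement is the Claim_ definition above) =====
theorem cond_iff (c : Char) :
    (¬('a' ≤ c ∧ c ≤ 'z') ∧ ¬('A' ≤ c ∧ c ≤ 'Z') ∧ ¬('0' ≤ c ∧ c ≤ '9') ∧ c ∉ ['-', '_', '=']) ↔ b64Class c = false := by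
  simp only [b64Class, Bool.or_eq_false_iff, Bool.and_eq_false_iff, beq_eq_false_iff_ne, ne_eq,
    decide_eq_false_iff_not, List.mem_cons, List.not_mem_nil, or_false, not_or, not_and]
  tauto

theorem loop_eq_all (l : List Char) : base64_valid_loop l = l.all b64Class := by
  induction l with
  | nil => rfl
  | cons c rest ih =>
      rw [base64_valid_loop, List.all_cons, ← ih]
      split_ifs with h
      · rw [(cond_iff c).1 h]; rfl
      · have : b64Class c = true := by
          cases hb : b64Class c
          · exact absurd ((cond_iff c).2 hb) h
          · rfl
        rw [this, Bool.true_and]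

theorem base64_valid_spec : Claim_equal_base64_valid := by
  intro val _
  unfold Spec_base64_valid base64_valid base64_valid_alt
  exact loop_eq_all val.toList
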